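-- pv_equiv track=rewrite | github.com/HyunHoCha/distributed_qc | src/utils_volume.py | merge_unary_gates
-- ===== SOURCE A (Python) =====
-- def merge_unary_gates(circuit):
--     _circuit = [circuit[0] + (0,)]
--
--     t = 1
--     for qubit_set in circuit:
--         if qubit_set == _circuit[-1][:-1]:
--             pass
--         else:
--             _circuit.append(qubit_set + (t,))
--             t += 1
--
--     return _circuit
-- ===== SOURCE B (Python) =====
-- def merge_unary_gates(circuit):
--     # Recursive run-skipping: peel one run of equal elements at a time.
--     def go(rest, t):
--         if not rest:
--             return []
--         head = rest[0]
--         while rest and rest[0] == head: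
--             rest = rest[1:]
--         return [head + (t,)] + go(rest, t + 1)
--     return go(circuit, 0)
-- ===== Notes on version B (the rewrite author's own statement) =====
-- stated objective: alternative
-- what changed: Replaces A's single element-wise pass comparing each element against the growing output's last entry by a recursive run-skipping decomposition: peel off one maximal run of equal elements per recursive call and emit one tagged entry per run; on the empty list B naturally returns [] where A raises IndexError.
-- outside the precondition, e.g. on merge_unary_gates([]): A raises IndexError, B returns []
import Mathlib
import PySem

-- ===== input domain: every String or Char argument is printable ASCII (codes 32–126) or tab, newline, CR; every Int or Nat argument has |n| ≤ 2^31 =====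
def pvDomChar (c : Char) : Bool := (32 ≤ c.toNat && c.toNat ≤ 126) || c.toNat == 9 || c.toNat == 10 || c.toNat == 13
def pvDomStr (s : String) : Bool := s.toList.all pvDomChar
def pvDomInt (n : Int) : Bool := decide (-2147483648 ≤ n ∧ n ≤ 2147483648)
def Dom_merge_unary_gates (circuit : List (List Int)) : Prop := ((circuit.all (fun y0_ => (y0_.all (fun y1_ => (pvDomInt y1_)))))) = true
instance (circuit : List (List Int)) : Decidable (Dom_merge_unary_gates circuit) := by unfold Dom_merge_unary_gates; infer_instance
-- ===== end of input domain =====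

-- B replaces A's element-wise pass (compare against last output entry) by recursive
-- run-skipping: one recursive call per maximal run of equal elements; same return value
-- on nonempty input, and B returns [] where A raises IndexError on the empty list.

-- ===== PORT A =====
-- loop state: (_circuit, t); '_circuit[-1][:-1]' is the last appended element without its
-- trailing index, ported as .getLastD [] (the list is always nonempty) and .dropLast (exact
-- for [:-1] on a list).
def mugStep (st : List (List Int) × Int) (qs : List Int) : List (List Int) × Int :=
  if qs = (st.1.getLastD []).dropLast then st
  else (st.1 ++ [qs ++ [st.2]], st.2 + 1)

def merge_unary_gates (circuit : List (List Int)) : List (List Int) :=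
  match PySem.List.pyGet? circuit 0 with
  | none => []   -- circuit[0] raises IndexError in Python; excluded by Pre_
  | some h => (circuit.foldl mugStep ([h ++ [(0 : Int)]], 1)).1

-- ===== PORT B =====
-- go(rest, t): the inner 'while rest and rest[0] == head: rest = rest[1:]' drops the
-- maximal prefix of elements equal to head, ported as dropWhile on the full run.
def mugGo : List (List Int) → Int → List (List Int)
  | [], _ => []
  | x :: xs, t => (x ++ [t]) :: mugGo ((x :: xs).dropWhile (· == x)) (t + 1)
  termination_by l _ => l.length
  decreasing_by
    simp only [List.dropWhile_cons, beq_self_eq_true, if_true, List.length_cons]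
    exact Nat.lt_succ_of_le (List.length_dropWhile_le _ _)

def merge_unary_gates_alt (circuit : List (List Int)) : List (List Int) :=
  mugGo circuit 0

-- ===== PRECONDITION & SPEC =====
-- A indexes circuit[0]: Python raises IndexError on the empty list, so it is excluded.
def Pre_merge_unary_gates (circuit : List (List Int)) : Prop := circuit ≠ []
instance (circuit : List (List Int)) : Decidable (Pre_merge_unary_gates circuit) := by
  unfold Pre_merge_unary_gates; infer_instance
def pvWitness_merge_unary_gates : List (List Int) := [[1, 2], [1, 2], [3]]

def Spec_merge_unary_gates (circuit : List (List Int)) (out : List (List Int)) : Prop := out = merge_unary_gates_alt circuit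
instance (circuit : List (List Int)) (out : List (List Int)) : Decidable (Spec_merge_unary_gates circuit out) := by unfold Spec_merge_unary_gates; infer_instance

-- ===== CLAIM (what is proved, stated in full; the proofs are below) =====
def Claim_equal_merge_unary_gates : Prop := ∀ (circuit : List (List Int)), Dom_merge_unary_gates circuit → Pre_merge_unary_gates circuit → Spec_merge_unary_gates circuit (merge_unary_gates circuit)

-- ===== LEMMAS AND PROOFS =====

-- consecutive-distinct elements of l, relative to the previous key k (characterises A)
def keysFrom (k : List Int) (l : List (List Int)) : List (List Int) :=
  match l with
  | [] => []
  | x :: xs => if x = k then keysFrom k xs else x :: keysFrom x xs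

-- first element of each maximal run (characterises B)
def runKeys : List (List Int) → List (List Int)
  | [] => []
  | x :: xs => x :: runKeys (xs.dropWhile (· == x))
  termination_by l => l.length
  decreasing_by
    simp only [List.length_cons]
    exact Nat.lt_succ_of_le (List.length_dropWhile_le _ _)

-- attach indices t, t+1, … to the keys
def tag (t : Int) (ks : List (List Int)) : List (List Int) :=
  match ks with
  | [] => []
  | x :: xs => (x ++ [t]) :: tag (t + 1) xs

theorem foldl_mugStep (l : List (List Int)) :
    ∀ (acc : List (List Int)) (k : List Int) (t : Int), acc ≠ [] →
    (acc.getLastD []).dropLast = k →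
    (l.foldl mugStep (acc, t)).1 = acc ++ tag t (keysFrom k l) := by
  induction l with
  | nil => intro acc k t _ _; simp [keysFrom, tag]
  | cons x xs ih =>
    intro acc k t hne hlast
    by_cases hx : x = k
    · simp only [List.foldl_cons, mugStep, hlast, hx, keysFrom]
      exact ih acc k t hne hlast
    · have hlast' : (acc.getLast?.getD []).dropLast = k := by
        rw [← List.getLastD_eq_getLast?]; exact hlast
      have hstep : mugStep (acc, t) x = (acc ++ [x ++ [t]], t + 1) := by
        simp [mugStep, hlast', hx]
      rw [List.foldl_cons, hstep,
          ih (acc ++ [x ++ [t]]) x (t + 1) (by simp) (by simp)]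
      simp [keysFrom, hx, tag]

theorem keysFrom_eq_runKeys_dropWhile (l : List (List Int)) :
    ∀ (k : List Int), keysFrom k l = runKeys (l.dropWhile (· == k)) := by
  induction l with
  | nil => intro k; simp [keysFrom, runKeys]
  | cons x xs ih =>
    intro k
    by_cases hx : x = k
    · subst hx
      simp only [keysFrom, if_true, List.dropWhile_cons, BEq.rfl, if_true]
      exact ih x
    · have hbx : (x == k) = false := by simp [hx]
      simp only [keysFrom, hx, if_false, List.dropWhile_cons, hbx,
        Bool.false_eq_true, if_false]
      rw [ih x]
      conv_rhs => rw [runKeys]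

theorem mugGo_eq_tag_runKeys (l : List (List Int)) :
    ∀ (t : Int), mugGo l t = tag t (runKeys l) := by
  induction l using runKeys.induct with
  | case1 => intro t; simp [mugGo, runKeys, tag]
  | case2 x xs ih =>
    intro t
    rw [mugGo, runKeys, tag]
    simp only [List.dropWhile_cons, beq_self_eq_true, if_true]
    exact congrArg _ (ih (t + 1))

-- ===== VERDICT (by name: the statements are the Claim_ definitions above) =====
theorem merge_unary_gates_spec : Claim_equal_merge_unary_gates := by
  intro circuit _ hpre
  unfold Spec_merge_unary_gates merge_unary_gates merge_unary_gates_alt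
  obtain ⟨h, rest, rfl⟩ : ∃ h rest, circuit = h :: rest := by
    cases circuit with
    | nil => exact absurd rfl hpre
    | cons h rest => exact ⟨h, rest, rfl⟩
  have hget : PySem.List.pyGet? (h :: rest) 0 = some h := by
    simp [PySem.List.pyGet?, PySem.List.pyIdx?]
  rw [hget]
  dsimp only
  have hfold := foldl_mugStep (h :: rest) [h ++ [(0 : Int)]] h 1 (by simp) (by simp)
  rw [hfold]
  have hkeys : keysFrom h (h :: rest) = keysFrom h rest := by simp [keysFrom]
  rw [hkeys, keysFrom_eq_runKeys_dropWhile, mugGo_eq_tag_runKeys]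
  conv_rhs => rw [runKeys]
  simp [tag]
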